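-- pv_equiv track=rewrite | github.com/Nethrananda21/Blostem_Marketing_Automation | apps/api/app/services/agent.py | _should_use_live_research
-- ===== SOURCE A (Python) =====
-- def _should_use_live_research(prompt: str) -> bool:
--     normalized = prompt.lower()
--     research_markers = [
--         "deep research",
--         "research",
--         "live search",
--         "search the web",
--         "recent",
--         "latest",
--         "news",
--         "executive hire",
--         "executive hires",
--         "compliance issue",
--         "compliance issues",
--         "fine",
--         "penalty",
--         "rbi",
--         "2026",
--     ]
--     return any(marker in normalized for marker in research_markers)
-- ===== SOURCE B (Python) =====
-- _MARKERS = (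
--     "deep research",
--     "research",
--     "live search",
--     "search the web",
--     "recent",
--     "latest",
--     "news",
--     "executive hire",
--     "executive hires",
--     "compliance issue",
--     "compliance issues",
--     "fine",
--     "penalty",
--     "rbi",
--     "2026",
-- )
--
--
-- def _should_use_live_research(prompt: str) -> bool:
--     # single left-to-right pass: at each position, does some marker start here?
--     s = prompt.lower()
--     for i in range(len(s) + 1):
--         if any(s.startswith(m, i) for m in _MARKERS):
--             return True
--     return False
-- ===== Notes on version B (the rewrite author's own statement) =====
-- stated objective: alternative
-- what changed: Replaces the per-marker substring scans (one 'in' search per marker) with a single left-to-right pass over the lowercased prompt that at each position checks whether any marker starts there (the hand-written form of one alternation-automaton pass).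
import Mathlib
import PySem

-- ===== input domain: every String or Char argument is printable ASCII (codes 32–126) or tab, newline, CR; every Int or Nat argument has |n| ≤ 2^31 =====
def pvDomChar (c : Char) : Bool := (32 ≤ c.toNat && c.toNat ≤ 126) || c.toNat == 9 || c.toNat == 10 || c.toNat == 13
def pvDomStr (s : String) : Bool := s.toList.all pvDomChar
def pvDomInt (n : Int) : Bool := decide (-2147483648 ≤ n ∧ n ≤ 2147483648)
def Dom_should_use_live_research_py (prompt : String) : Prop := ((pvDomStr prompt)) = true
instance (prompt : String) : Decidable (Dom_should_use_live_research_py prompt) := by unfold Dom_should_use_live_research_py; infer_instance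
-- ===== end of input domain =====

-- B replaces A's per-marker substring tests with one left-to-right scan of the
-- lowercased prompt that checks at each position whether some marker starts there.

-- ===== PORT A =====
def should_use_live_research_py (prompt : String) : Bool :=
  let normalized := PySem.Str.lower prompt
  let research_markers : List String :=
    ["deep research", "research", "live search", "search the web", "recent",
     "latest", "news", "executive hire", "executive hires", "compliance issue",
     "compliance issues", "fine", "penalty", "rbi", "2026"]
  research_markers.any (fun marker => PySem.Str.isIn marker normalized)

-- ===== PORT B =====
-- the same marker strings, as char lists (B scans characters)
def pvAltMarkers : List (List Char) :=
  ["deep research".toList, "research".toList, "live search".toList,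
   "search the web".toList, "recent".toList, "latest".toList, "news".toList,
   "executive hire".toList, "executive hires".toList, "compliance issue".toList,
   "compliance issues".toList, "fine".toList, "penalty".toList, "rbi".toList,
   "2026".toList]

-- one pass over the lowercased prompt: at each suffix, does some marker start here?
def pvAltScan : List Char → Bool
  | [] => pvAltMarkers.any (fun m => m.isPrefixOf [])
  | c :: rest =>
    pvAltMarkers.any (fun m => m.isPrefixOf (c :: rest)) || pvAltScan rest

def should_use_live_research_py_alt (prompt : String) : Bool :=
  pvAltScan (PySem.Str.lower prompt).toList

-- ===== PRECONDITION & SPEC =====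
def Spec_should_use_live_research_py (prompt : String) (out : Bool) : Prop := out = should_use_live_research_py_alt prompt
instance (prompt : String) (out : Bool) : Decidable (Spec_should_use_live_research_py prompt out) := by unfold Spec_should_use_live_research_py; infer_instance

-- ===== CLAIM (what is proved, stated in full; the proofs are below) =====
def Claim_equal_should_use_live_research_py : Prop := ∀ (prompt : String), Dom_should_use_live_research_py prompt → Spec_should_use_live_research_py prompt (should_use_live_research_py prompt)

-- ===== LEMMAS AND PROOFS =====

-- the scan finds exactly the markers that occur as an infix
theorem pvAltScan_iff (s : List Char) :
    pvAltScan s = true ↔ ∃ m ∈ pvAltMarkers, m <:+: s := by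
  induction s with
  | nil =>
    simp only [pvAltScan, List.any_eq_true, List.isPrefixOf_iff_prefix]
    exact exists_congr fun m => and_congr_right fun _ => by
      rw [List.prefix_nil, List.infix_nil]
  | cons c rest ih =>
    simp only [pvAltScan, Bool.or_eq_true, List.any_eq_true,
      List.isPrefixOf_iff_prefix, ih]
    constructor
    · rintro (⟨m, hm, hp⟩ | ⟨m, hm, hi⟩)
      · exact ⟨m, hm, hp.isInfix⟩
      · exact ⟨m, hm, hi.trans (List.suffix_cons c rest).isInfix⟩
    · rintro ⟨m, hm, hi⟩
      rcases List.infix_cons_iff.mp hi with h | h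
      · exact Or.inl ⟨m, hm, h⟩
      · exact Or.inr ⟨m, hm, h⟩

theorem pvAltMarkers_eq :
    pvAltMarkers =
      ["deep research", "research", "live search", "search the web", "recent",
       "latest", "news", "executive hire", "executive hires", "compliance issue",
       "compliance issues", "fine", "penalty", "rbi", "2026"].map String.toList := rfl

-- ===== VERDICT (by name: the statement is the Claim_ definition above) =====
theorem should_use_live_research_py_spec : Claim_equal_should_use_live_research_py := by
  intro prompt _
  unfold Spec_should_use_live_research_py should_use_live_research_py
    should_use_live_research_py_alt
  rw [Bool.eq_iff_iff, pvAltScan_iff]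
  simp only [List.any_eq_true, pvAltMarkers_eq, List.mem_map,
    PySem.Str.isIn_iff_infix]
  constructor
  · rintro ⟨mk, hmk, h⟩; exact ⟨mk.toList, ⟨mk, hmk, rfl⟩, h⟩
  · rintro ⟨m, ⟨mk, hmk, rfl⟩, h⟩; exact ⟨mk, hmk, h⟩
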